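-- pv_equiv track=rewrite | github.com/GoonerTim/olympic | 1765D.py | ch
-- ===== SOURCE A (Python) =====
-- def ch(x, c, m):
--     s, e = 0, x
--     d = []
--     for i in range(0, x + 1):
--         if i % 2 == 0:
--             d.append(c[e])
--             e -= 1
--         else:
--             d.append(c[s])
--             s += 1
--     for i in range(1, len(d)):
--         if d[i] + d[i - 1] > m:
--             return False
--     return True
-- ===== SOURCE B (Python) =====
-- def ch(x, c, m):
--     # Closed-form pairwise check: the adjacent pairs of the interleaved
--     # arrangement c[x], c[0], c[x-1], c[1], ... are exactly (c[j], c[x-j])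
--     # and (c[j], c[x-1-j]); test those sums directly, never simulating the
--     # pointer walk or building the arrangement.
--     return (all(c[j] + c[x - j] <= m for j in range((x + 1) // 2))
--             and all(c[j] + c[x - 1 - j] <= m for j in range(x // 2)))
-- ===== Notes on version B (the rewrite author's own statement) =====
-- stated objective: simpler
-- what changed: B replaces A's pointer-driven simulation (build the interleaved arrangement, then scan adjacent sums) with a closed-form index identity: the adjacent pairs are exactly (c[j], c[x-j]) and (c[j], c[x-1-j]), so B tests those sums directly in two comprehensions with no pointers and no intermediate list.
import Mathlib
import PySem

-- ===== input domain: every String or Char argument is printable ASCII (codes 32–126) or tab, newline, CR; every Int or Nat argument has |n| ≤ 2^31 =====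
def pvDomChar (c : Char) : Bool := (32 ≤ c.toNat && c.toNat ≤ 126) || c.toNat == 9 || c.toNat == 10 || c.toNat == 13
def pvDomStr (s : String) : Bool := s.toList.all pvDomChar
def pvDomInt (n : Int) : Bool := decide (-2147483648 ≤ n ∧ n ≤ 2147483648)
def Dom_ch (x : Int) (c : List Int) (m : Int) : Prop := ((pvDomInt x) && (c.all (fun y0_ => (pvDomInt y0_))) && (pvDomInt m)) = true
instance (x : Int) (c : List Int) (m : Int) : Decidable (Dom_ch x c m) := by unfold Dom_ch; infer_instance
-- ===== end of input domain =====

-- B replaces A's build-the-interleaving-then-scan algorithm by the closed-form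
-- pairwise check c[j]+c[x-j] ≤ m and c[j]+c[x-1-j] ≤ m (objective: simpler).

-- ===== PORT A =====
-- first loop of A: fold over range(0, x+1) with state (s, e, d)
def chBuild (c : List Int) (l : List Int) (st : Int × Int × List Int) : Int × Int × List Int :=
  l.foldl (fun st i =>
    let s := st.1; let e := st.2.1; let d := st.2.2
    if i % 2 == 0 then (s, e - 1, d ++ [(PySem.List.pyGet? c e).getD 0])
    else (s + 1, e, d ++ [(PySem.List.pyGet? c s).getD 0])) st

-- second loop of A: scan indices, early return False
def chScan (d : List Int) (m : Int) : List Int → Bool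
  | [] => true
  | i :: rest =>
    if (PySem.List.pyGet? d i).getD 0 + (PySem.List.pyGet? d (i - 1)).getD 0 > m then false
    else chScan d m rest

def ch (x : Int) (c : List Int) (m : Int) : Bool :=
  let d := (chBuild c (PySem.List.pyRange 0 (x + 1) 1) (0, x, [])).2.2
  chScan d m (PySem.List.pyRange 1 (d.length : Int) 1)

-- ===== PORT B =====
def ch_alt (x : Int) (c : List Int) (m : Int) : Bool :=
  ((PySem.List.pyRange 0 (PySem.Int.floordiv (x + 1) 2) 1).all fun j =>
      decide ((PySem.List.pyGet? c j).getD 0 + (PySem.List.pyGet? c (x - j)).getD 0 ≤ m))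
  && ((PySem.List.pyRange 0 (PySem.Int.floordiv x 2) 1).all fun j =>
      decide ((PySem.List.pyGet? c j).getD 0 + (PySem.List.pyGet? c (x - 1 - j)).getD 0 ≤ m))

-- ===== PRECONDITION & SPEC =====
-- Pre_ excludes exactly the inputs where A raises IndexError: 0 ≤ x but x ≥ len(c)
-- (then c[e] with e = x is out of range on the very first step).
def Pre_ch (x : Int) (c : List Int) (m : Int) : Prop := x < 0 ∨ x < (c.length : Int)
instance (x : Int) (c : List Int) (m : Int) : Decidable (Pre_ch x c m) := by unfold Pre_ch; infer_instance
def pvWitness_ch : Int × List Int × Int := (2, ([1, 2, 3] : List Int), 10)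

def Spec_ch (x : Int) (c : List Int) (m : Int) (out : Bool) : Prop := out = ch_alt x c m
instance (x : Int) (c : List Int) (m : Int) (out : Bool) : Decidable (Spec_ch x c m out) := by unfold Spec_ch; infer_instance

-- ===== CLAIM (what is proved, stated in full; the proofs are below) =====
def Claim_equal_ch : Prop := ∀ (x : Int) (c : List Int) (m : Int), Dom_ch x c m → Pre_ch x c m → Spec_ch x c m (ch x c m)

-- ===== LEMMAS AND PROOFS =====

-- proof-side abbreviation for Python's c[i]-as-total-value
def pvG (c : List Int) (i : Int) : Int := (PySem.List.pyGet? c i).getD 0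

-- the interleaved sequence generated along a range list, as a spec
def gen (c : List Int) : List Int → Int → Int → List Int
  | [], _, _ => []
  | i :: rest, s, e =>
    if i % 2 == 0 then pvG c e :: gen c rest s (e - 1)
    else pvG c s :: gen c rest (s + 1) e

-- adjacent-sum check, structurally
def adjOk (m : Int) : List Int → Bool
  | [] => true
  | [_] => true
  | a :: b :: rest => if a + b > m then false else adjOk m (b :: rest)

theorem adjOk_cons2 (m a b : Int) (t : List Int) :
    adjOk m (a :: b :: t) = (decide (a + b ≤ m) && adjOk m (b :: t)) := by
  by_cases h : a + b > m
  · have h' : ¬ (a + b ≤ m) := by omega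
    simp [adjOk, h, h']
  · have h' : a + b ≤ m := by omega
    simp [adjOk, h, h']

theorem chBuild_eq_gen (c : List Int) (l : List Int) :
    ∀ (s e : Int) (d : List Int),
      (chBuild c l (s, e, d)).2.2 = d ++ gen c l s e := by
  induction l with
  | nil => intro s e d; simp [chBuild, gen]
  | cons i rest ih =>
    intro s e d
    cases h : (i % 2 == 0) with
    | true =>
      simp only [chBuild, List.foldl_cons, gen, h, if_true]
      have := ih s (e - 1) (d ++ [(PySem.List.pyGet? c e).getD 0])
      simp only [chBuild] at this
      rw [this]; simp [pvG]
    | false =>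
      simp only [chBuild, List.foldl_cons, gen, h, Bool.false_eq_true, if_false]
      have := ih (s + 1) e (d ++ [(PySem.List.pyGet? c s).getD 0])
      simp only [chBuild] at this
      rw [this]; simp [pvG]

-- A's index scan over range(k, len d) equals adjOk on the suffix from k-1
theorem chScan_eq_adjOk (d : List Int) (m : Int) :
    ∀ (k : Nat), 1 ≤ k →
      chScan d m (PySem.List.pyRange (k : Int) (d.length : Int) 1) = adjOk m (d.drop (k - 1)) := by
  intro k hk
  by_cases hlen : d.length ≤ k
  · rw [PySem.List.pyRange_one_eq_nil (by exact_mod_cast hlen)]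
    have hle : (d.drop (k - 1)).length ≤ 1 := by rw [List.length_drop]; omega
    cases hdk : d.drop (k - 1) with
    | nil => simp [chScan, adjOk]
    | cons a t =>
      cases t with
      | nil => simp [chScan, adjOk]
      | cons b t' => rw [hdk] at hle; simp at hle
  · push_neg at hlen
    rw [PySem.List.pyRange_one_cons (by exact_mod_cast hlen)]
    have hk1 : k - 1 < d.length := by omega
    have hdk : d.drop (k - 1) = d[k - 1] :: d.drop k := by
      have hkk : k - 1 + 1 = k := by omega
      rw [List.drop_eq_getElem_cons hk1, hkk]
    have hget_k : (PySem.List.pyGet? d (k : Int)).getD 0 = d[k] := by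
      rw [PySem.List.pyGet?_natCast]
      simp [List.getElem?_eq_getElem hlen]
    have hget_k1 : (PySem.List.pyGet? d ((k : Int) - 1)).getD 0 = d[k - 1] := by
      have hcast : ((k : Int) - 1) = ((k - 1 : Nat) : Int) := by omega
      rw [hcast, PySem.List.pyGet?_natCast]
      simp [List.getElem?_eq_getElem hk1]
    have hdk2 : d.drop (k - 1) = d[k - 1] :: d[k] :: d.drop (k + 1) := by
      rw [hdk, List.drop_eq_getElem_cons hlen]
    simp only [chScan, hget_k, hget_k1]
    rw [hdk2]
    by_cases hc : d[k] + d[k - 1] > m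
    · rw [if_pos hc, adjOk]
      rw [if_pos (by omega)]
    · rw [if_neg hc, adjOk, if_neg (by omega)]
      have ih := chScan_eq_adjOk d m (k + 1) (by omega)
      have hcast : ((k : Int) + 1) = ((k + 1 : Nat) : Int) := by omega
      rw [hcast, ih]
      simp only [Nat.add_sub_cancel]
      rw [← List.drop_eq_getElem_cons hlen]
  termination_by k => d.length - (k - 1)
  decreasing_by omega

-- B's two all-quantified ranges, started at j (the suffix form used in the induction)
def allA (c : List Int) (m x j : Int) : Bool :=
  (PySem.List.pyRange j (PySem.Int.floordiv (x + 1) 2) 1).all fun t =>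
    decide (pvG c t + pvG c (x - t) ≤ m)
def allB (c : List Int) (m x j : Int) : Bool :=
  (PySem.List.pyRange j (PySem.Int.floordiv x 2) 1).all fun t =>
    decide (pvG c t + pvG c (x - 1 - t) ≤ m)

theorem bool_rearrange (a b p q : Bool) : (a && (b && (p && q))) = ((a && p) && (b && q)) := by
  cases a <;> cases b <;> cases p <;> cases q <;> rfl

theorem fd2 (y : Int) : PySem.Int.floordiv y 2 = y / 2 := PySem.Int.floordiv_eq_ediv_of_pos (by omega)

-- the core identity: adjOk over the interleaving from odd step 2j+1 equals the
-- two pairwise suffix checks from j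
theorem main_lemma (c : List Int) (m x : Int) (j : Int) (hj : 0 ≤ j) :
    adjOk m (pvG c (x - j) :: gen c (PySem.List.pyRange (2*j + 1) (x + 1) 1) j (x - j - 1))
    = (allA c m x j && allB c m x j) := by
  by_cases h1 : x < 2*j + 1
  · rw [PySem.List.pyRange_one_eq_nil (by omega : (x:Int) + 1 ≤ 2*j + 1)]
    have hA : allA c m x j = true := by
      unfold allA; rw [PySem.List.pyRange_one_eq_nil (by rw [fd2]; omega)]; rfl
    have hB : allB c m x j = true := by
      unfold allB; rw [PySem.List.pyRange_one_eq_nil (by rw [fd2]; omega)]; rfl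
    simp [gen, adjOk, hA, hB]
  · push_neg at h1
    rw [PySem.List.pyRange_one_cons (by omega : 2*j + 1 < x + 1)]
    have hodd : ((2*j + 1) % 2 == 0) = false := by
      have : (2*j + 1) % 2 = 1 := by omega
      simp [this]
    simp only [gen, hodd, Bool.false_eq_true, if_false]
    rw [adjOk_cons2]
    have hAcons : allA c m x j = (decide (pvG c j + pvG c (x - j) ≤ m) && allA c m x (j+1)) := by
      unfold allA
      rw [PySem.List.pyRange_one_cons (by rw [fd2]; omega : j < PySem.Int.floordiv (x+1) 2)]
      simp
    by_cases h2 : 2*j + 2 ≤ x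
    · rw [PySem.List.pyRange_one_cons (by omega : 2*j + 1 + 1 < x + 1)]
      have heven : ((2*j + 1 + 1) % 2 == 0) = true := by
        have : (2*j + 1 + 1) % 2 = 0 := by omega
        simp [this]
      simp only [gen, heven, if_true]
      rw [adjOk_cons2]
      have hrec := main_lemma c m x (j+1) (by omega)
      rw [show (2*(j+1) + 1 : Int) = 2*j + 1 + 1 + 1 by ring,
          show (x - (j+1) : Int) = x - j - 1 by ring] at hrec
      rw [hrec]
      have hBcons : allB c m x j = (decide (pvG c j + pvG c (x - j - 1) ≤ m) && allB c m x (j+1)) := by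
        unfold allB
        rw [PySem.List.pyRange_one_cons (by rw [fd2]; omega : j < PySem.Int.floordiv x 2)]
        simp [show (x - 1 - j : Int) = x - j - 1 by ring]
      rw [hAcons, hBcons, Int.add_comm (pvG c (x - j)) (pvG c j)]
      exact bool_rearrange _ _ _ _
    · have hx2 : x = 2*j + 1 := by omega
      rw [PySem.List.pyRange_one_eq_nil (by omega : (x:Int) + 1 ≤ 2*j + 1 + 1)]
      simp only [gen]
      have hA1 : allA c m x (j+1) = true := by
        unfold allA; rw [PySem.List.pyRange_one_eq_nil (by rw [fd2]; omega)]; rfl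
      have hB0 : allB c m x j = true := by
        unfold allB; rw [PySem.List.pyRange_one_eq_nil (by rw [fd2]; omega)]; rfl
      rw [hAcons, hA1, hB0, Int.add_comm (pvG c (x - j)) (pvG c j)]
      simp [adjOk]
  termination_by (x + 1 - 2*j).toNat
  decreasing_by omega

theorem ch_alt_eq_all (x : Int) (c : List Int) (m : Int) :
    ch_alt x c m = (allA c m x 0 && allB c m x 0) := by
  unfold ch_alt allA allB pvG
  rfl

theorem ch_eq_alt (x : Int) (c : List Int) (m : Int) : ch x c m = ch_alt x c m := by
  by_cases hx : x < 0
  · have hr : PySem.List.pyRange 0 (x + 1) 1 = [] :=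
      PySem.List.pyRange_one_eq_nil (by omega)
    have hA0 : allA c m x 0 = true := by
      unfold allA; rw [PySem.List.pyRange_one_eq_nil (by rw [fd2]; omega)]; rfl
    have hB0 : allB c m x 0 = true := by
      unfold allB; rw [PySem.List.pyRange_one_eq_nil (by rw [fd2]; omega)]; rfl
    rw [ch_alt_eq_all, hA0, hB0]
    rw [ch, hr]
    simp only [chBuild, List.foldl_nil]
    rw [PySem.List.pyRange_one_eq_nil (by simp)]
    rfl
  · push_neg at hx
    have hr : PySem.List.pyRange 0 (x + 1) 1 = 0 :: PySem.List.pyRange 1 (x + 1) 1 :=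
      PySem.List.pyRange_one_cons (by omega)
    have hd : (chBuild c (PySem.List.pyRange 0 (x + 1) 1) (0, x, [])).2.2 =
        pvG c x :: gen c (PySem.List.pyRange 1 (x + 1) 1) 0 (x - 1) := by
      rw [chBuild_eq_gen, hr]
      simp [gen, pvG]
    rw [ch, hd]
    have hs := chScan_eq_adjOk (pvG c x ::
      gen c (PySem.List.pyRange 1 (x + 1) 1) 0 (x - 1)) m 1 (le_refl 1)
    simp only [Nat.cast_one, Nat.sub_self, List.drop_zero] at hs
    rw [hs]
    have hmain := main_lemma c m x 0 (le_refl 0)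
    rw [show (2*(0:Int) + 1 : Int) = 1 by ring, show (x - (0:Int) : Int) = x by ring] at hmain
    rw [hmain, ch_alt_eq_all]

-- ===== VERDICT (by name: the statement is the Claim_ definition above) =====
theorem ch_spec : Claim_equal_ch := by
  intro x c m _ _
  unfold Spec_ch
  exact ch_eq_alt x c m
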